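-- pv_equiv track=rewrite | github.com/lamwassi/tackle_dockerhub_image_search | src/add_images.py | entity_index_mapper
-- ===== SOURCE A (Python) =====
-- def entity_index_mapper(catalogue_images:dict) :
--     dockerhub_mapper_indexes , openshift_mapper_indexes , operator_mapper_indexes = [] , [] , []
--     dockerhub_indexes , openshift_indexes , operator_indexes = [] ,[] ,[]
--
--     for catalogue_name, catalogue_data in catalogue_images.items():
--         for image in catalogue_data:
--             if  catalogue_name == "docker_images":
--                 index = [image[key] for key in list(image.keys())[1:]  if image[key] ]
--                 dockerhub_mapper_indexes.append(index)
--             elif catalogue_name == "openshift_images":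
--                 index = [image[key] for key in list(image.keys())[1:]  if image[key] ]
--                 openshift_mapper_indexes.append(index)
--             elif catalogue_name =="operator_images":
--                 index = [image[key] for key in list(image.keys())[1:]  if image[key] ]
--                 operator_mapper_indexes.append(index)
--             else: continue
--
--
--     for indexes in dockerhub_mapper_indexes:
--         for idx in indexes:
--             dockerhub_indexes.append(idx)
--
--
--     for indexes in openshift_mapper_indexes:
--         for idx in indexes:
--             openshift_indexes.append(idx)
--
--
--     for indexes in operator_mapper_indexes:
--         for idx in indexes:
--             operator_indexes.append(idx)
--
--     return dockerhub_indexes ,openshift_indexes , operator_indexes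
-- ===== SOURCE B (Python) =====
-- def entity_index_mapper(catalogue_images: dict):
--     dockerhub_indexes, openshift_indexes, operator_indexes = [], [], []
--     targets = {
--         "docker_images": dockerhub_indexes,
--         "openshift_images": openshift_indexes,
--         "operator_images": operator_indexes,
--     }
--     for catalogue_name, catalogue_data in catalogue_images.items():
--         target = targets.get(catalogue_name)
--         if target is None:
--             continue
--         for image in catalogue_data:
--             target.extend(v for k, v in list(image.items())[1:] if v)
--     return dockerhub_indexes, openshift_indexes, operator_indexes
-- ===== Notes on version B (the rewrite author's own statement) =====
-- stated objective: simpler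
-- what changed: One pass that appends field values straight into per-category flat lists chosen via a name-to-list dict (using image.items()[1:] directly), instead of an if/elif chain building nested per-category lists that are then flattened by three separate double loops.
import Mathlib
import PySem

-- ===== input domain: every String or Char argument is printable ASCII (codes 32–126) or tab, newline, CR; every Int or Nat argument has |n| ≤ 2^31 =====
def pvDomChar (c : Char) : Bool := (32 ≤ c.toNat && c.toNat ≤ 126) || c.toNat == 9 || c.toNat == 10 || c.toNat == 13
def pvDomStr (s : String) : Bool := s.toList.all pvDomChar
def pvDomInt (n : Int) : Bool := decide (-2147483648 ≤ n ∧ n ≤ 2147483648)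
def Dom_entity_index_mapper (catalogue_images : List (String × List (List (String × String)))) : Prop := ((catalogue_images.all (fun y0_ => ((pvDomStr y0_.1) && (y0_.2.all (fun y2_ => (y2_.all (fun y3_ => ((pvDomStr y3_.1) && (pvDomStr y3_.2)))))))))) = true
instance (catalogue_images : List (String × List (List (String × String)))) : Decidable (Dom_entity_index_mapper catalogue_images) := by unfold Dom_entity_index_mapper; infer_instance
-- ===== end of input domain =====

-- B replaces A's if/elif dispatch into nested per-category lists plus three flatten double-loops
-- by one pass appending field values straight into the three flat lists (objective: simpler).

-- ===== PORT A =====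
-- [image[key] for key in list(image.keys())[1:] if image[key]]  (image is a dict; key is
-- always present, so image[key] is getD; truthiness of a str is ≠ "")
def pvIndexOfImage (image : List (String × String)) : List String :=
  ((PySem.Dict.ofList image).keys.drop 1).filterMap (fun key =>
    if (PySem.Dict.ofList image).getD key "" ≠ "" then
      some ((PySem.Dict.ofList image).getD key "") else none)

def entity_index_mapper (catalogue_images : List (String × List (List (String × String)))) : List String × List String × List String :=
  -- phase 1: the dispatch loop over catalogue_images.items(), building the three mapper lists
  let mappers :=
    ((PySem.Dict.ofList catalogue_images).items).foldl
      (fun (acc : List (List String) × List (List String) × List (List String)) cd =>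
        cd.2.foldl
          (fun (acc : List (List String) × List (List String) × List (List String)) image =>
            if cd.1 == "docker_images" then
              (acc.1 ++ [pvIndexOfImage image], acc.2.1, acc.2.2)
            else if cd.1 == "openshift_images" then
              (acc.1, acc.2.1 ++ [pvIndexOfImage image], acc.2.2)
            else if cd.1 == "operator_images" then
              (acc.1, acc.2.1, acc.2.2 ++ [pvIndexOfImage image])
            else acc)
          acc)
      ([], [], [])
  -- phase 2: the three flatten double-loops
  let flat := fun (ls : List (List String)) =>
    ls.foldl (fun l idxs => idxs.foldl (fun l idx => l ++ [idx]) l) ([] : List String)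
  (flat mappers.1, flat mappers.2.1, flat mappers.2.2)

-- ===== PORT B =====
-- v for k, v in list(image.items())[1:] if v
def pvValsOfImage (image : List (String × String)) : List String :=
  ((PySem.Dict.ofList image).items.drop 1).filterMap
    (fun p => if p.2 ≠ "" then some p.2 else none)

def entity_index_mapper_alt (catalogue_images : List (String × List (List (String × String)))) : List String × List String × List String :=
  -- single pass: targets.get(catalogue_name) selects the flat list extended in place
  ((PySem.Dict.ofList catalogue_images).items).foldl
    (fun (acc : List String × List String × List String) cd =>
      if cd.1 == "docker_images" then
        (cd.2.foldl (fun t image => t ++ pvValsOfImage image) acc.1, acc.2.1, acc.2.2)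
      else if cd.1 == "openshift_images" then
        (acc.1, cd.2.foldl (fun t image => t ++ pvValsOfImage image) acc.2.1, acc.2.2)
      else if cd.1 == "operator_images" then
        (acc.1, acc.2.1, cd.2.foldl (fun t image => t ++ pvValsOfImage image) acc.2.2)
      else acc)
    ([], [], [])

-- ===== PRECONDITION & SPEC =====
def Spec_entity_index_mapper (catalogue_images : List (String × List (List (String × String)))) (out : List String × List String × List String) : Prop := out = entity_index_mapper_alt catalogue_images
instance (catalogue_images : List (String × List (List (String × String)))) (out : List String × List String × List String) : Decidable (Spec_entity_index_mapper catalogue_images out) := by unfold Spec_entity_index_mapper; infer_instance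

-- ===== CLAIM (what is proved, stated in full; the proofs are below) =====
def Claim_equal_entity_index_mapper : Prop := ∀ (catalogue_images : List (String × List (List (String × String)))), Dom_entity_index_mapper catalogue_images → Spec_entity_index_mapper catalogue_images (entity_index_mapper catalogue_images)

-- ===== LEMMAS AND PROOFS =====

-- proof-only names for the two loop bodies (definitionally the lambdas in the ports)
def pvStepA (acc : List (List String) × List (List String) × List (List String))
    (cd : String × List (List (String × String))) :
    List (List String) × List (List String) × List (List String) :=
  cd.2.foldl
    (fun acc image =>
      if cd.1 == "docker_images" then
        (acc.1 ++ [pvIndexOfImage image], acc.2.1, acc.2.2)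
      else if cd.1 == "openshift_images" then
        (acc.1, acc.2.1 ++ [pvIndexOfImage image], acc.2.2)
      else if cd.1 == "operator_images" then
        (acc.1, acc.2.1, acc.2.2 ++ [pvIndexOfImage image])
      else acc)
    acc

def pvStepB (acc : List String × List String × List String)
    (cd : String × List (List (String × String))) :
    List String × List String × List String :=
  if cd.1 == "docker_images" then
    (cd.2.foldl (fun t image => t ++ pvValsOfImage image) acc.1, acc.2.1, acc.2.2)
  else if cd.1 == "openshift_images" then
    (acc.1, cd.2.foldl (fun t image => t ++ pvValsOfImage image) acc.2.1, acc.2.2)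
  else if cd.1 == "operator_images" then
    (acc.1, acc.2.1, cd.2.foldl (fun t image => t ++ pvValsOfImage image) acc.2.2)
  else acc

theorem pvIndex_eq_vals (image : List (String × String)) :
    pvIndexOfImage image = pvValsOfImage image := by
  unfold pvIndexOfImage pvValsOfImage
  rw [PySem.Dict.items_eq_map_keys (PySem.Dict.ofList image)
        (PySem.Dict.nodup_keys_ofList image) "", List.drop_one, List.drop_one,
      ← List.map_tail, List.filterMap_map]
  rfl

theorem pv_append_fold (xs : List String) (l : List String) :
    xs.foldl (fun l idx => l ++ [idx]) l = l ++ xs := by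
  induction xs generalizing l with
  | nil => simp
  | cons x xs ih =>
    rw [List.foldl_cons, ih, List.append_assoc, List.singleton_append]

theorem pv_flat_fold (ls : List (List String)) (acc : List String) :
    ls.foldl (fun l idxs => idxs.foldl (fun l idx => l ++ [idx]) l) acc
      = acc ++ ls.flatten := by
  induction ls generalizing acc with
  | nil => simp
  | cons x xs ih =>
    rw [List.foldl_cons, pv_append_fold, ih, List.flatten_cons, List.append_assoc]

theorem pv_inner (imgs : List (List (String × String))) (m : List (List String)) :
    (imgs.foldl (fun m image => m ++ [pvIndexOfImage image]) m).flatten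
      = imgs.foldl (fun t image => t ++ pvValsOfImage image) m.flatten := by
  induction imgs generalizing m with
  | nil => rfl
  | cons i is ih =>
    rw [List.foldl_cons, List.foldl_cons, ih]
    simp [pvIndex_eq_vals]

theorem pv_fold_fst (imgs : List (List (String × String)))
    (a : List (List String)) (bc : List (List String) × List (List String)) :
    imgs.foldl (fun (acc : List (List String) × List (List String) × List (List String)) image =>
        (acc.1 ++ [pvIndexOfImage image], acc.2.1, acc.2.2)) (a, bc)
      = (imgs.foldl (fun m image => m ++ [pvIndexOfImage image]) a, bc) := by
  induction imgs generalizing a with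
  | nil => rfl
  | cons i is ih => rw [List.foldl_cons, List.foldl_cons]; exact ih _

theorem pv_fold_snd (imgs : List (List (String × String)))
    (a b c : List (List String)) :
    imgs.foldl (fun (acc : List (List String) × List (List String) × List (List String)) image =>
        (acc.1, acc.2.1 ++ [pvIndexOfImage image], acc.2.2)) (a, b, c)
      = (a, imgs.foldl (fun m image => m ++ [pvIndexOfImage image]) b, c) := by
  induction imgs generalizing b with
  | nil => rfl
  | cons i is ih => rw [List.foldl_cons, List.foldl_cons]; exact ih _

theorem pv_fold_thd (imgs : List (List (String × String)))
    (a b c : List (List String)) :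
    imgs.foldl (fun (acc : List (List String) × List (List String) × List (List String)) image =>
        (acc.1, acc.2.1, acc.2.2 ++ [pvIndexOfImage image])) (a, b, c)
      = (a, b, imgs.foldl (fun m image => m ++ [pvIndexOfImage image]) c) := by
  induction imgs generalizing c with
  | nil => rfl
  | cons i is ih => rw [List.foldl_cons, List.foldl_cons]; exact ih _

def pvFlat (ls : List (List String)) : List String :=
  ls.foldl (fun l idxs => idxs.foldl (fun l idx => l ++ [idx]) l) []

theorem pvFlat_eq (ls : List (List String)) : pvFlat ls = ls.flatten := by
  unfold pvFlat; rw [pv_flat_fold]; rfl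

theorem pv_fold_id {α β : Type} (imgs : List β) (z : α) :
    imgs.foldl (fun acc _ => acc) z = z := by
  induction imgs with
  | nil => rfl
  | cons i is ih => rw [List.foldl_cons]; exact ih

theorem pv_main (items : List (String × List (List (String × String))))
    (a b c : List (List String)) :
    ((items.foldl pvStepA (a, b, c)).1.flatten,
     (items.foldl pvStepA (a, b, c)).2.1.flatten,
     (items.foldl pvStepA (a, b, c)).2.2.flatten)
      = items.foldl pvStepB (a.flatten, b.flatten, c.flatten) := by
  induction items generalizing a b c with
  | nil => rfl
  | cons cd rest ih =>
    rw [List.foldl_cons, List.foldl_cons]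
    by_cases h1 : cd.1 == "docker_images"
    · have hA : pvStepA (a, b, c) cd
          = (cd.2.foldl (fun m image => m ++ [pvIndexOfImage image]) a, b, c) := by
        unfold pvStepA; simp only [h1, if_true]; exact pv_fold_fst _ _ _
      have hB : pvStepB (a.flatten, b.flatten, c.flatten) cd
          = ((cd.2.foldl (fun m image => m ++ [pvIndexOfImage image]) a).flatten, b.flatten, c.flatten) := by
        unfold pvStepB; simp only [h1, if_true]; rw [← pv_inner]
      rw [hA, hB]; exact ih _ b c
    · by_cases h2 : cd.1 == "openshift_images"
      · have hA : pvStepA (a, b, c) cd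
            = (a, cd.2.foldl (fun m image => m ++ [pvIndexOfImage image]) b, c) := by
          unfold pvStepA; simp only [h1, h2, if_true, if_false, Bool.false_eq_true]
          exact pv_fold_snd _ _ _ _
        have hB : pvStepB (a.flatten, b.flatten, c.flatten) cd
            = (a.flatten, (cd.2.foldl (fun m image => m ++ [pvIndexOfImage image]) b).flatten, c.flatten) := by
          unfold pvStepB; simp only [h1, h2, if_true, if_false, Bool.false_eq_true]
          rw [← pv_inner]
        rw [hA, hB]; exact ih a _ c
      · by_cases h3 : cd.1 == "operator_images"
        · have hA : pvStepA (a, b, c) cd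
              = (a, b, cd.2.foldl (fun m image => m ++ [pvIndexOfImage image]) c) := by
            unfold pvStepA; simp only [h1, h2, h3, if_true, if_false, Bool.false_eq_true]
            exact pv_fold_thd _ _ _ _
          have hB : pvStepB (a.flatten, b.flatten, c.flatten) cd
              = (a.flatten, b.flatten, (cd.2.foldl (fun m image => m ++ [pvIndexOfImage image]) c).flatten) := by
            unfold pvStepB; simp only [h1, h2, h3, if_true, if_false, Bool.false_eq_true]
            rw [← pv_inner]
          rw [hA, hB]; exact ih a b _
        · have hA : pvStepA (a, b, c) cd = (a, b, c) := by
            unfold pvStepA; simp only [h1, h2, h3, if_false, Bool.false_eq_true]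
            exact pv_fold_id _ _
          have hB : pvStepB (a.flatten, b.flatten, c.flatten) cd
              = (a.flatten, b.flatten, c.flatten) := by
            unfold pvStepB; simp only [h1, h2, h3, if_false, Bool.false_eq_true]
          rw [hA, hB]; exact ih a b c

-- ===== VERDICT (by name: the statement is the Claim_ definition above) =====
theorem entity_index_mapper_spec : Claim_equal_entity_index_mapper := by
  intro ci _
  unfold Spec_entity_index_mapper
  change (pvFlat (List.foldl pvStepA ([], [], []) (PySem.Dict.ofList ci).items).1,
          pvFlat (List.foldl pvStepA ([], [], []) (PySem.Dict.ofList ci).items).2.1,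
          pvFlat (List.foldl pvStepA ([], [], []) (PySem.Dict.ofList ci).items).2.2)
        = List.foldl pvStepB ([], [], []) (PySem.Dict.ofList ci).items
  rw [pvFlat_eq, pvFlat_eq, pvFlat_eq]
  exact pv_main _ [] [] []
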